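-- pv_equiv track=rewrite | github.com/mohamedIzoughne/Primary_Key | primaryKey.py | filterKeysByRHS
-- ===== SOURCE A (Python) =====
-- def checkIfExists(attributes, attrToBeChecked): ## check if each attribute exist inside attrToCheck
--     attrExists = True
--     for part in attributes:
--         if part not in attrToBeChecked:
--             attrExists = False
--             break
--
--     return attrExists
--
-- def filterKeysByRHS(possibleKeys, rightHandSideAttributes):
--     if(len(rightHandSideAttributes) == 0): return possibleKeys
--     rightHandSideAttributes = ''.join(rightHandSideAttributes)
--     filteredPossibleKeys = []
--
--     for candidate in possibleKeys:
--         if checkIfExists(rightHandSideAttributes, candidate):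
--             filteredPossibleKeys.append(candidate)
--
--     return filteredPossibleKeys
-- ===== SOURCE B (Python) =====
-- def filterKeysByRHS(possibleKeys, rightHandSideAttributes):
--     result = possibleKeys
--     for ch in ''.join(rightHandSideAttributes):
--         result = [c for c in result if ch in c]
--     return result
-- ===== Notes on version B (the rewrite author's own statement) =====
-- stated objective: simpler
-- what changed: Replaced the candidate-loop with a helper membership check by successive narrowing: iterate over the joined RHS characters and rebind the survivor list with one filter per character; the empty-RHS early return and the helper disappear.
import Mathlib
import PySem

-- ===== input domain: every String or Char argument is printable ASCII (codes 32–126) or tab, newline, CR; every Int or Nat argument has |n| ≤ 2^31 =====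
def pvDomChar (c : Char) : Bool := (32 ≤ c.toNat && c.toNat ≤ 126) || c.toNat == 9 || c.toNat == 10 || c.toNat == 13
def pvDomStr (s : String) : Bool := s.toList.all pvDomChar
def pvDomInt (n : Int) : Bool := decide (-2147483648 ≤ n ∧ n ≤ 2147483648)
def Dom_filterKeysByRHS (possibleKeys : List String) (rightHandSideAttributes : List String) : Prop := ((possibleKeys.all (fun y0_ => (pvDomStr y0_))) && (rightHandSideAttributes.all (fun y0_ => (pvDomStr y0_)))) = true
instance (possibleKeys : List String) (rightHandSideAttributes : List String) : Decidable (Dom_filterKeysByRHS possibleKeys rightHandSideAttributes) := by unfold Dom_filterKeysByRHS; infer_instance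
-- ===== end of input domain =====

-- B narrows the candidate list with one filter per RHS character instead of scanning candidates with a helper; same cost, simpler.


-- ===== PORT A =====
-- 'part in candidate' with part a single character is exactly char-membership in the candidate's characters
def checkIfExists (attributes : List Char) (attrToBeChecked : String) : Bool :=
  match attributes with
  | [] => true                                   -- attrExists stays True
  | part :: rest =>
      if !(attrToBeChecked.toList.contains part) then false   -- attrExists = False; break
      else checkIfExists rest attrToBeChecked

def filterKeysByRHS (possibleKeys : List String) (rightHandSideAttributes : List String) : List String :=
  if rightHandSideAttributes.length == 0 then possibleKeys
  else
    let joined := PySem.Str.join "" rightHandSideAttributes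
    possibleKeys.foldl (fun filteredPossibleKeys candidate =>
      if checkIfExists joined.toList candidate then filteredPossibleKeys ++ [candidate]
      else filteredPossibleKeys) []

-- ===== PORT B =====
def filterKeysByRHS_alt (possibleKeys : List String) (rightHandSideAttributes : List String) : List String :=
  (PySem.Str.join "" rightHandSideAttributes).toList.foldl
    (fun result ch => result.filter (fun c => c.toList.contains ch)) possibleKeys

-- ===== PRECONDITION & SPEC =====
def Spec_filterKeysByRHS (possibleKeys : List String) (rightHandSideAttributes : List String) (out : List String) : Prop := out = filterKeysByRHS_alt possibleKeys rightHandSideAttributes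
instance (possibleKeys : List String) (rightHandSideAttributes : List String) (out : List String) : Decidable (Spec_filterKeysByRHS possibleKeys rightHandSideAttributes out) := by unfold Spec_filterKeysByRHS; infer_instance

-- ===== CLAIM (what is proved, stated in full; the proofs are below) =====
def Claim_equal_filterKeysByRHS : Prop := ∀ (possibleKeys : List String) (rightHandSideAttributes : List String), Dom_filterKeysByRHS possibleKeys rightHandSideAttributes → Spec_filterKeysByRHS possibleKeys rightHandSideAttributes (filterKeysByRHS possibleKeys rightHandSideAttributes)

-- ===== LEMMAS AND PROOFS =====

theorem checkIfExists_eq_all (L : List Char) (c : String) :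
    checkIfExists L c = L.all (fun ch => c.toList.contains ch) := by
  induction L with
  | nil => rfl
  | cons p rest ih =>
      simp only [checkIfExists, List.all_cons]
      rw [ih]
      by_cases h : p ∈ c.toList
      · simp [h]
      · simp [h]

theorem foldl_filter_eq_filter_all (L : List Char) (xs : List String) :
    L.foldl (fun r ch => r.filter (fun c => c.toList.contains ch)) xs
      = xs.filter (fun c => L.all (fun ch => c.toList.contains ch)) := by
  induction L generalizing xs with
  | nil => simp
  | cons p rest ih =>
      simp only [List.foldl_cons, ih, List.filter_filter, List.all_cons]
      congr 1
      funext c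
      rw [Bool.and_comm]

theorem filterKeysByRHS_spec' (possibleKeys rightHandSideAttributes : List String) :
    filterKeysByRHS possibleKeys rightHandSideAttributes
      = filterKeysByRHS_alt possibleKeys rightHandSideAttributes := by
  unfold filterKeysByRHS filterKeysByRHS_alt
  by_cases h : rightHandSideAttributes.length = 0
  · have : rightHandSideAttributes = [] := List.length_eq_zero_iff.mp h
    subst this
    simp [PySem.Str.join]
  · rw [foldl_filter_eq_filter_all]
    rw [PySem.List.foldl_append_if_eq_filter]
    simp only [List.nil_append, h, beq_iff_eq, if_false]
    exact List.filter_congr (fun c _ => by rw [checkIfExists_eq_all])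

-- ===== VERDICT (by name: the statement is the Claim_ definition above) =====
theorem filterKeysByRHS_spec : Claim_equal_filterKeysByRHS := by
  intro pk rhs _
  exact filterKeysByRHS_spec' pk rhs
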